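-- pv_equiv track=rewrite | github.com/Inassonasow/chat_bot | grossesse_bot/chatbot/nlp_processor.py | is_emergency
-- ===== SOURCE A (Python) =====
-- def is_emergency(text: str) -> bool:
--     """Détermine si le message indique une urgence"""
--     text = text.lower()
--
--     emergency_phrases = [
--         'saignement abondant', 'beaucoup de sang',
--         'douleur insupportable', 'très mal',
--         'contractions régulières', 'travail',
--         'perte des eaux', 'liquide',
--         'fièvre élevée', 'plus de 38',
--         'vision floue', 'maux de tête sévères',
--         'vomissements incessants'
--     ]
--
--     for phrase in emergency_phrases:
--         if phrase in text:
--             return True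
--
--     return False
-- ===== SOURCE B (Python) =====
-- def is_emergency(text: str) -> bool:
--     """Determine si le message indique une urgence (trie-based multi-pattern scan)."""
--     emergency_phrases = [
--         'saignement abondant', 'beaucoup de sang',
--         'douleur insupportable', 'très mal',
--         'contractions régulières', 'travail',
--         'perte des eaux', 'liquide',
--         'fièvre élevée', 'plus de 38',
--         'vision floue', 'maux de tête sévères',
--         'vomissements incessants'
--     ]
--
--     # Build a prefix trie of all phrases once; None key marks end of a phrase.
--     root = {}
--     for phrase in emergency_phrases:
--         node = root
--         for c in phrase:
--             node = node.setdefault(c, {})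
--         node[None] = True
--
--     t = text.lower()
--     n = len(t)
--     # Single left-to-right scan: from each position walk the trie, sharing
--     # common prefixes among phrases instead of scanning per phrase.
--     for i in range(n + 1):
--         node = root
--         j = i
--         while True:
--             if None in node:
--                 return True
--             if j >= n or t[j] not in node:
--                 break
--             node = node[t[j]]
--             j += 1
--     return False
-- ===== Notes on version B (the rewrite author's own statement) =====
-- stated objective: alternative
-- what changed: Replaced A's 13 independent substring scans by building a prefix trie of the phrases once and doing a single left-to-right scan of the text, walking the trie from each position so common phrase prefixes are matched by one shared traversal with no per-phrase inner loop.
import Mathlib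
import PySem

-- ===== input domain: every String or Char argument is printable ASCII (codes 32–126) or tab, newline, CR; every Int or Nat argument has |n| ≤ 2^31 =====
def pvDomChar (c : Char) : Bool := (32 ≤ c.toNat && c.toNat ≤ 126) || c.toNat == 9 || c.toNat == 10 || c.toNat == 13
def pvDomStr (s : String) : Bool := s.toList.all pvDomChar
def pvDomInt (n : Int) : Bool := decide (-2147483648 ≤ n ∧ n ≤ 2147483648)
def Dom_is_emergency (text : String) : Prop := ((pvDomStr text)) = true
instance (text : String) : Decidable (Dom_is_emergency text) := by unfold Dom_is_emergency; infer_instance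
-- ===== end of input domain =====

-- B replaces A's 13 independent per-phrase substring scans by a prefix trie of the
-- phrases built once, walked from each text position in a single left-to-right scan
-- (objective: alternative).

-- the shared constant phrase list (data, used verbatim by both programs)
def pvEmergencyPhrases : List (List Char) :=
  ["saignement abondant".toList, "beaucoup de sang".toList,
   "douleur insupportable".toList, "très mal".toList,
   "contractions régulières".toList, "travail".toList,
   "perte des eaux".toList, "liquide".toList,
   "fièvre élevée".toList, "plus de 38".toList,
   "vision floue".toList, "maux de tête sévères".toList,
   "vomissements incessants".toList]

-- ===== PORT A =====
-- A's loop: for phrase in emergency_phrases: if phrase in text: return True; return False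
def pvLoopA : List (List Char) → List Char → Bool
  | [], _ => false
  | p :: ps, t => if PySem.Chars.isIn p t then true else pvLoopA ps t

def is_emergency (text : String) : Bool :=
  let t := PySem.Chars.lower text.toList
  pvLoopA pvEmergencyPhrases t

-- ===== PORT B =====
-- a trie node: terminal flag + children (explicit child-list type, g since nested
-- inductives are not allowed); mirrors B's dict-of-dicts with the None terminal key
mutual
inductive PTrie where
  | mk : Bool → PChildren → PTrie
inductive PChildren where
  | nil : PChildren
  | cons : Char → PTrie → PChildren → PChildren
end

-- dict lookup node[c] on the children
def pvChildFind : PChildren → Char → Option PTrie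
  | .nil, _ => none
  | .cons d t rest, c => if d = c then some t else pvChildFind rest c

-- insertion of one phrase (B's inner 'node = node.setdefault(c, {})' walk ending
-- with 'node[None] = True'); pvGo inserts under character c, creating a fresh node
-- when absent (setdefault), recursing with the continuation for the tail
def pvTrieInsert : List Char → PTrie → PTrie
  | [], .mk _ ch => .mk true ch
  | c :: cs, .mk b ch => .mk b (pvGo c (pvTrieInsert cs) ch)
where
  pvGo (c : Char) (f : PTrie → PTrie) : PChildren → PChildren
  | .nil => .cons c (f (.mk false .nil)) .nil
  | .cons d t rest => if d = c then .cons d (f t) rest else .cons d t (pvGo c f rest)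

-- B's trie built once from the phrase list
def pvRoot : PTrie := pvEmergencyPhrases.foldl (fun tr p => pvTrieInsert p tr) (.mk false .nil)

-- B's inner while loop: walk the trie along the text suffix; terminal node → match
def pvTrieWalk : PTrie → List Char → Bool
  | .mk true _, _ => true
  | .mk false _, [] => false
  | .mk false ch, c :: cs =>
      match pvChildFind ch c with
      | none => false
      | some t => pvTrieWalk t cs

-- B's outer loop: for i in range(n + 1): walk from position i
def pvScan : List Nat → List Char → Bool
  | [], _ => false
  | i :: is_, t => if pvTrieWalk pvRoot (t.drop i) then true else pvScan is_ t

def is_emergency_alt (text : String) : Bool :=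
  let t := PySem.Chars.lower text.toList
  pvScan (List.range (t.length + 1)) t

-- ===== PRECONDITION & SPEC =====
def Spec_is_emergency (text : String) (out : Bool) : Prop := out = is_emergency_alt text
instance (text : String) (out : Bool) : Decidable (Spec_is_emergency text out) := by unfold Spec_is_emergency; infer_instance

-- ===== CLAIM =====
def Claim_equal_is_emergency : Prop := ∀ (text : String), Dom_is_emergency text → Spec_is_emergency text (is_emergency text)

-- ===== LEMMAS AND PROOFS =====

theorem pvTrieWalk_empty (l : List Char) : pvTrieWalk (.mk false .nil) l = false := by
  cases l <;> simp [pvTrieWalk, pvChildFind]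

theorem pvChildFind_pvGo (c d : Char) (f : PTrie → PTrie) (ch : PChildren) :
    pvChildFind (pvTrieInsert.pvGo c f ch) d =
      if d = c then some (f ((pvChildFind ch c).getD (.mk false .nil)))
      else pvChildFind ch d :=
  match ch with
  | .nil => by
      by_cases h : d = c
      · simp [pvTrieInsert.pvGo, pvChildFind, h]
      · simp [pvTrieInsert.pvGo, pvChildFind, h, Ne.symm h]
  | .cons e t rest => by
      have ih := pvChildFind_pvGo c d f rest
      by_cases hec : e = c
      · subst hec
        by_cases hd : d = e
        · simp [pvTrieInsert.pvGo, pvChildFind, hd]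
        · simp [pvTrieInsert.pvGo, pvChildFind, hd, Ne.symm hd]
      · by_cases hd : d = e
        · subst hd
          simp [pvTrieInsert.pvGo, pvChildFind, hec]
        · simp [pvTrieInsert.pvGo, pvChildFind, hec, hd, Ne.symm hd, ih]

theorem pvTrieWalk_insert (p : List Char) (tr : PTrie) (l : List Char) :
    pvTrieWalk (pvTrieInsert p tr) l = (decide (p <+: l) || pvTrieWalk tr l) := by
  induction p generalizing tr l with
  | nil =>
      cases tr with
      | mk b ch => simp [pvTrieInsert, pvTrieWalk]
  | cons c cs ih =>
      cases tr with
      | mk b ch =>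
        cases b with
        | true => simp [pvTrieInsert, pvTrieWalk]
        | false =>
          cases l with
          | nil => simp [pvTrieInsert, pvTrieWalk]
          | cons d ds =>
            simp only [pvTrieInsert, pvTrieWalk, pvChildFind_pvGo]
            by_cases hd : d = c
            · subst hd
              cases hfind : pvChildFind ch d with
              | none =>
                  simp [ih, pvTrieWalk_empty, List.cons_prefix_cons]
              | some t =>
                  simp [ih, List.cons_prefix_cons]
            · have : ¬ (c :: cs <+: d :: ds) := by
                simp [List.cons_prefix_cons]; intro h; exact absurd h.symm hd
              simp [hd, this]

theorem pvTrieWalk_foldl (ps : List (List Char)) (tr : PTrie) (l : List Char) :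
    pvTrieWalk (ps.foldl (fun tr p => pvTrieInsert p tr) tr) l
      = (ps.any (fun p => decide (p <+: l)) || pvTrieWalk tr l) := by
  induction ps generalizing tr with
  | nil => simp
  | cons p ps ih =>
      simp [List.foldl_cons, ih, pvTrieWalk_insert, Bool.or_assoc, Bool.or_comm]

theorem pvTrieWalk_root (l : List Char) :
    pvTrieWalk pvRoot l = pvEmergencyPhrases.any (fun p => decide (p <+: l)) := by
  simp [pvRoot, pvTrieWalk_foldl, pvTrieWalk_empty]

theorem pvScan_eq_any (is_ : List Nat) (t : List Char) :
    pvScan is_ t = is_.any (fun i => pvEmergencyPhrases.any (fun p => decide (p <+: t.drop i))) := by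
  induction is_ with
  | nil => rfl
  | cons i is_ ih =>
      simp only [pvScan, List.any_cons, ih, pvTrieWalk_root]
      split_ifs with h <;> simp [h]

theorem pvLoopA_eq_any (ps : List (List Char)) (t : List Char) :
    pvLoopA ps t = ps.any (fun p => PySem.Chars.isIn p t) := by
  induction ps with
  | nil => rfl
  | cons p ps ih =>
      simp only [pvLoopA, List.any_cons, ih]
      split_ifs with h <;> simp [h]

-- A's per-phrase substring test coincides with the existence of a matching start position
theorem pv_isIn_iff_exists_pos (p t : List Char) :
    PySem.Chars.isIn p t = true ↔
      ∃ i ∈ List.range (t.length + 1), p <+: t.drop i := by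
  constructor
  · intro h
    obtain ⟨j, hj⟩ := (PySem.Chars.exists_prefix_drop_iff_isIn p t).2 h
    refine ⟨min j t.length, ?_, ?_⟩
    · simp only [List.mem_range]; omega
    · rcases le_or_gt j t.length with hle | hgt
      · simpa [Nat.min_eq_left hle] using hj
      · have hnil : t.drop j = [] := List.drop_eq_nil_of_le (by omega)
        have hp : p = [] := List.prefix_nil.1 (hnil ▸ hj)
        simp [hp]
  · rintro ⟨i, _, hi⟩
    exact (PySem.Chars.exists_prefix_drop_iff_isIn p t).1 ⟨i, hi⟩

theorem pv_main (t : List Char) :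
    pvLoopA pvEmergencyPhrases t = pvScan (List.range (t.length + 1)) t := by
  rw [pvLoopA_eq_any, pvScan_eq_any]
  rcases hb : pvEmergencyPhrases.any (fun p => PySem.Chars.isIn p t) with _ | _
  · symm
    rw [List.any_eq_false] at hb ⊢
    intro i hi
    simp only [Bool.not_eq_true, List.any_eq_false, Bool.not_eq_true]
    intro p hp
    by_contra hc
    have : PySem.Chars.isIn p t = true :=
      (pv_isIn_iff_exists_pos p t).2 ⟨i, hi, by simpa using hc⟩
    simpa [this] using hb p hp
  · symm
    rw [List.any_eq_true] at hb ⊢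
    obtain ⟨p, hp, hin⟩ := hb
    obtain ⟨i, hi, hs⟩ := (pv_isIn_iff_exists_pos p t).1 (by simpa using hin)
    exact ⟨i, hi, List.any_eq_true.2 ⟨p, hp, by simpa using hs⟩⟩

-- ===== VERDICT =====
theorem is_emergency_spec : Claim_equal_is_emergency := by
  intro text _
  unfold Spec_is_emergency is_emergency is_emergency_alt
  exact pv_main _
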